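-- pv_equiv track=rewrite | github.com/panda-34/epibook.github.io | solutions/python/replace_and_remove.py | replace_and_remove
-- ===== SOURCE A (Python) =====
-- def replace_and_remove(s):
--     # Use list of characters as a mutable string.
--     s = s.copy()
--     # Forward iteration: remove 'b's and count the number of 'a's.
--     write_idx = 0
--     a_count = 0
--     for c in s:
--         if c != 'b':
--             s[write_idx] = c
--             write_idx += 1
--         if c == 'a':
--             a_count += 1
--
--     # Allocates space according to the number of 'a'.
--     new_len = write_idx + a_count
--     if new_len > len(s):
--         s += [''] * (new_len - len(s))
--     else:
--         del s[new_len:]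
--     # Backward iteration: replace "a"s with "dd"s starting from the end.
--     cur_idx = write_idx - 1
--     write_idx = -1
--     while cur_idx >= 0:
--         if s[cur_idx] == 'a':
--             s[write_idx] = 'd'
--             write_idx -= 1
--             s[write_idx] = 'd'
--             write_idx -= 1
--         else:
--             s[write_idx] = s[cur_idx]
--             write_idx -= 1
--         cur_idx -= 1
--     return s
-- ===== SOURCE B (Python) =====
-- def replace_and_remove(s):
--     # Single forward pass building a fresh list: 'a' -> 'dd', drop 'b', keep rest.
--     out = []
--     for c in s:
--         if c == 'a':
--             out.append('d')
--             out.append('d')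
--         elif c != 'b':
--             out.append(c)
--     return out
-- ===== Notes on version B (the rewrite author's own statement) =====
-- stated objective: simpler
-- what changed: Replaces A's in-place compaction pass plus resize plus backward expansion pass with a single forward pass that builds a fresh output list.
import Mathlib
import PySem

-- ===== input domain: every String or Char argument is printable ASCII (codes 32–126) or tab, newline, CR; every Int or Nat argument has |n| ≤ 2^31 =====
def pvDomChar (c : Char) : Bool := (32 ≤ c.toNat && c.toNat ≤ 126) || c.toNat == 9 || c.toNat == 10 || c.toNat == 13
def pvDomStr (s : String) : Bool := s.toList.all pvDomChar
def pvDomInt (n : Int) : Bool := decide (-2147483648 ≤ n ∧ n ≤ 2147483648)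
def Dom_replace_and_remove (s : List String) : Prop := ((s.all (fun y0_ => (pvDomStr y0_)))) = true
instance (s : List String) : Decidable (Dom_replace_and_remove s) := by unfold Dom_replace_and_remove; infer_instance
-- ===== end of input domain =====

-- B rebuilds the result in one forward pass instead of A's in-place compaction,
-- resize and backward expansion; objective: simpler. Neither implementation
-- mutates its argument (A copies first), so return-value equivalence is the whole story.

-- ===== PORT A =====
-- s[k] = v with a negative index k (Python indexes from the end); in every use the index is in range
def raSetNeg (l : List String) (i : Int) (v : String) : List String :=
  l.set ((l.length : Int) + i).toNat v

-- the backward while loop; fuel = number of iterations (cur starts at write_idx-1 and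
-- decreases by 1 each iteration, so the loop runs exactly write_idx times)
def raPhase2 (l : List String) (cur write : Int) : Nat → List String
  | 0 => l
  | f + 1 =>
    if cur ≥ 0 then
      if l.getD cur.toNat "" = "a" then
        raPhase2 (raSetNeg (raSetNeg l write "d") (write - 1) "d") (cur - 1) (write - 2) f
      else
        raPhase2 (raSetNeg l write (l.getD cur.toNat "")) (cur - 1) (write - 1) f
    else l

-- one iteration of the forward for-loop (reads the current, possibly already
-- overwritten, list — like Python iterating the list it mutates)
def raStep (st : List String × Nat × Nat) (i : Nat) : List String × Nat × Nat :=
  ((if st.1.getD i "" ≠ "b" then st.1.set st.2.1 (st.1.getD i "") else st.1),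
   (if st.1.getD i "" ≠ "b" then st.2.1 + 1 else st.2.1),
   (if st.1.getD i "" = "a" then st.2.2 + 1 else st.2.2))

def replace_and_remove (s : List String) : List String :=
  let st := (List.range s.length).foldl raStep (s, 0, 0)
  let new_len := st.2.1 + st.2.2
  let l2 := if new_len > st.1.length then st.1 ++ List.replicate (new_len - st.1.length) ""
            else st.1.take new_len
  raPhase2 l2 ((st.2.1 : Int) - 1) (-1) st.2.1

-- ===== PORT B =====
def replace_and_remove_alt (s : List String) : List String :=
  s.foldl (fun out c =>
    if c = "a" then out ++ ["d", "d"]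
    else if c ≠ "b" then out ++ [c]
    else out) []

-- ===== PRECONDITION & SPEC =====
def Spec_replace_and_remove (s : List String) (out : List String) : Prop := out = replace_and_remove_alt s
instance (s : List String) (out : List String) : Decidable (Spec_replace_and_remove s out) := by unfold Spec_replace_and_remove; infer_instance

-- ===== CLAIM (what is proved, stated in full; the proofs are below) =====
def Claim_equal_replace_and_remove : Prop := ∀ (s : List String), Dom_replace_and_remove s → Spec_replace_and_remove s (replace_and_remove s)

-- ===== LEMMAS AND PROOFS =====

-- what one character contributes to the output
def repB (c : String) : List String := if c = "a" then ["d", "d"] else if c = "b" then [] else [c]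
-- the same, on characters already known not to be "b"
def expandNB (c : String) : List String := if c = "a" then ["d", "d"] else [c]

theorem alt_eq_flatMap (s : List String) (acc : List String) :
    s.foldl (fun out c =>
      if c = "a" then out ++ ["d", "d"]
      else if c ≠ "b" then out ++ [c]
      else out) acc = acc ++ s.flatMap repB := by
  induction s generalizing acc with
  | nil => simp
  | cons c t ih =>
    simp only [List.foldl_cons, List.flatMap_cons, ih, repB]
    split_ifs <;> simp_all

theorem flatMap_filter (s : List String) :
    (s.filter (· ≠ "b")).flatMap expandNB = s.flatMap repB := by
  induction s with
  | nil => rfl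
  | cons c t ih =>
    by_cases hb : c = "b" <;> by_cases ha : c = "a" <;>
      simp_all [repB, expandNB]

-- setting the last element
theorem set_last (m : List String) (k : Nat) (v : String) (h : m.length = k + 1) :
    m.set k v = m.take k ++ [v] := by
  rw [List.set_eq_take_append_cons_drop]
  simp [h]

-- setting the last two elements
theorem set_last_two (m : List String) (k : Nat) (v w : String) (h : m.length = k + 2) :
    (m.set (k + 1) v).set k w = m.take k ++ [w, v] := by
  rw [set_last m (k + 1) v (by omega), List.set_append]
  have hlt : k < (m.take (k + 1)).length := by simp; omega
  rw [if_pos hlt, set_last _ k w (by simp; omega), List.take_take]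
  simp

-- the backward loop turns (compacted prefix t ++ junk of the right length) into the expansion of t
theorem phase2_spec (t : List String) : ∀ (junk don : List String),
    junk.length = t.count "a" →
    raPhase2 (t ++ junk ++ don) ((t.length : Int) - 1) (-(don.length : Int) - 1) t.length
      = t.flatMap expandNB ++ don := by
  induction t using List.reverseRecOn with
  | nil =>
    intro junk don h
    have hj : junk = [] := by simpa using h
    subst hj
    simp [raPhase2]
  | append_singleton t' c ih =>
    intro junk don h
    have hlen : (t' ++ [c]).length = t'.length + 1 := by simp
    have hcur : ((t'.length + 1 : Nat) : Int) - 1 = (t'.length : Int) := by push_cast; ring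
    -- the list, re-associated around the middle block m = c :: junk
    have hL : (t' ++ [c]) ++ junk ++ don = t' ++ ((c :: junk) ++ don) := by simp
    have hread : (t' ++ ((c :: junk) ++ don)).getD t'.length "" = c := by
      rw [List.getD_eq_getElem?_getD, List.getElem?_append_right (by omega)]
      simp
    have habs1 : (((t' ++ ((c :: junk) ++ don)).length : Int) + (-(don.length : Int) - 1)).toNat
        = t'.length + junk.length := by
      simp only [List.length_append, List.length_cons]
      omega
    rw [hL, hlen]
    simp only [raPhase2, hcur, Int.toNat_natCast]
    rw [if_pos (by positivity : ((t'.length : Int)) ≥ 0), hread]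
    by_cases ha : c = "a"
    · rw [if_pos ha]
      have hj : junk.length = t'.count "a" + 1 := by
        have := h; simp [ha, List.count_append] at this; omega
      -- first write: last cell of the middle block (c :: junk)
      have hw1 : raSetNeg (t' ++ ((c :: junk) ++ don)) (-(don.length : Int) - 1) "d"
          = t' ++ (((c :: junk).set junk.length "d") ++ don) := by
        unfold raSetNeg
        rw [habs1, List.set_append, if_neg (by omega)]
        have harith : t'.length + junk.length - t'.length = junk.length := by omega
        rw [harith, List.set_append,
          if_pos (by simp only [List.length_cons]; omega)]
      rw [hw1]
      -- second write: the cell before it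
      have habs2 : (((t' ++ (((c :: junk).set junk.length "d") ++ don)).length : Int)
            + (-(don.length : Int) - 1 - 1)).toNat = t'.length + (junk.length - 1) := by
        simp only [List.length_append, List.length_cons, List.length_set]
        omega
      have hst : ((c :: junk).set junk.length "d").set (junk.length - 1) "d"
          = (c :: junk).take (junk.length - 1) ++ ["d", "d"] := by
        have hk : junk.length - 1 + 1 = junk.length := by omega
        have h2 := set_last_two (c :: junk) (junk.length - 1) "d" "d"
          (by simp only [List.length_cons]; omega)
        rw [hk] at h2
        exact h2
      have hw2 : raSetNeg (t' ++ (((c :: junk).set junk.length "d") ++ don))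
            (-(don.length : Int) - 1 - 1) "d"
          = t' ++ ((c :: junk).take (junk.length - 1) ++ (["d", "d"] ++ don)) := by
        unfold raSetNeg
        rw [habs2, List.set_append, if_neg (by omega)]
        have harith : t'.length + (junk.length - 1) - t'.length = junk.length - 1 := by omega
        rw [harith, List.set_append,
          if_pos (by simp only [List.length_set, List.length_cons]; omega), hst]
        simp
      rw [hw2]
      have hwr : -(don.length : Int) - 1 - 2 = -(((["d", "d"] ++ don : List String)).length : Int) - 1 := by
        simp; ring
      have hjk : ((c :: junk).take (junk.length - 1)).length = t'.count "a" := by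
        simp only [List.length_take, List.length_cons]; omega
      have hih := ih ((c :: junk).take (junk.length - 1)) (["d", "d"] ++ don) hjk
      rw [List.append_assoc] at hih
      rw [hwr, hih]
      simp [ha, expandNB]
    · rw [if_neg ha]
      have hj : junk.length = t'.count "a" := by
        have := h; simp [List.count_append] at this
        simpa [List.count_singleton, ha] using this
      have hw1 : raSetNeg (t' ++ ((c :: junk) ++ don)) (-(don.length : Int) - 1) c
          = t' ++ ((c :: junk).take junk.length ++ (c :: don)) := by
        unfold raSetNeg
        rw [habs1, List.set_append, if_neg (by omega)]
        have harith : t'.length + junk.length - t'.length = junk.length := by omega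
        rw [harith, List.set_append,
          if_pos (by simp only [List.length_cons]; omega),
          set_last (c :: junk) junk.length c (by simp)]
        simp
      rw [hw1]
      have hwr : -(don.length : Int) - 1 - 1 = -(((c :: don : List String)).length : Int) - 1 := by
        simp; ring
      have hjk : ((c :: junk).take junk.length).length = t'.count "a" := by
        simp only [List.length_take, List.length_cons]; omega
      have hih := ih ((c :: junk).take junk.length) (c :: don) hjk
      rw [List.append_assoc] at hih
      rw [hwr, hih]
      simp [ha, expandNB]

-- invariant of the forward pass: after i steps the write pointer equals the length of the
-- "b"-free prefix, which sits at the front of the list; the unread suffix is untouched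
theorem phase1_spec (s : List String) : ∀ (i : Nat), i ≤ s.length →
    let st := (List.range i).foldl raStep (s, 0, 0)
    st.2.1 = ((s.take i).filter (· ≠ "b")).length ∧
    st.2.2 = (s.take i).count "a" ∧
    st.1.take st.2.1 = (s.take i).filter (· ≠ "b") ∧
    st.1.drop i = s.drop i ∧
    st.1.length = s.length ∧ st.2.1 ≤ i := by
  intro i
  induction i with
  | zero => intro _; simp
  | succ i ih =>
    intro hi
    have hi' : i ≤ s.length := by omega
    obtain ⟨hw, ha, htk, hdr, hln, hwi⟩ := ih hi'
    set st := (List.range i).foldl raStep (s, 0, 0) with hst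
    have hilt : i < s.length := by omega
    have hread : st.1.getD i "" = s[i] := by
      rw [List.getD_eq_getElem?_getD]
      have h1 : st.1[i]? = (st.1.drop i)[0]? := by simp [List.getElem?_drop]
      rw [h1, hdr, List.getElem?_drop]
      simp [hilt]
    have htks : s.take (i + 1) = s.take i ++ [s[i]] := by
      rw [List.take_add_one]
      simp [hilt]
    have hwlt : st.2.1 < st.1.length := by omega
    have hdr1 : st.1.drop (i + 1) = s.drop (i + 1) := by
      have h1 : st.1.drop (i + 1) = (st.1.drop i).drop 1 := by rw [List.drop_drop]
      have h2 : s.drop (i + 1) = (s.drop i).drop 1 := by rw [List.drop_drop]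
      rw [h1, h2, hdr]
    simp only [List.range_succ, List.foldl_append, List.foldl_cons, List.foldl_nil, ← hst]
    simp only [raStep, hread]
    by_cases hb : s[i] = "b"
    · have hbn : ¬(s[i] ≠ "b") := by simp [hb]
      rw [if_neg hbn, if_neg hbn, if_neg (show ¬(s[i] = "a") by simp [hb])]
      refine ⟨?_, ?_, ?_, hdr1, hln, by omega⟩
      · show st.2.1 = _
        rw [hw, htks, List.filter_append]
        simp [hb]
      · show st.2.2 = _
        rw [ha, htks, List.count_append]
        simp [hb]
      · show st.1.take st.2.1 = _
        rw [htk, htks, List.filter_append]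
        simp [hb]
    · rw [if_pos (show s[i] ≠ "b" from hb), if_pos (show s[i] ≠ "b" from hb)]
      refine ⟨?_, ?_, ?_, ?_, ?_, by omega⟩
      · show st.2.1 + 1 = _
        rw [hw, htks, List.filter_append]
        simp [hb]
      · show (if s[i] = "a" then st.2.2 + 1 else st.2.2) = _
        rw [htks, List.count_append]
        by_cases haa : s[i] = "a" <;> simp [haa, ha]
      · show (st.1.set st.2.1 s[i]).take (st.2.1 + 1) = _
        rw [List.set_eq_take_append_cons_drop, if_pos hwlt]
        have hlt : (st.1.take st.2.1).length = st.2.1 := by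
          simp only [List.length_take]; omega
        have h1 : (st.1.take st.2.1 ++ s[i] :: st.1.drop (st.2.1 + 1)).take (st.2.1 + 1)
            = st.1.take st.2.1 ++ [s[i]] := by
          rw [List.take_append, List.take_take, hlt]
          simp
        rw [h1, htk, htks, List.filter_append]
        simp [hb]
      · show (st.1.set st.2.1 s[i]).drop (i + 1) = _
        rw [List.drop_set_of_lt (by omega), hdr1]
      · show (st.1.set st.2.1 s[i]).length = s.length
        simp [hln]

-- ===== VERDICT (by name: the statement is the Claim_ definition above) =====
theorem replace_and_remove_spec : Claim_equal_replace_and_remove := by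
  intro s _
  unfold Spec_replace_and_remove replace_and_remove replace_and_remove_alt
  obtain ⟨hw, ha, htk, hdr, hln, hwi⟩ := phase1_spec s s.length le_rfl
  set st := (List.range s.length).foldl raStep (s, 0, 0) with hst
  rw [List.take_length] at hw ha htk
  set t := s.filter (· ≠ "b") with ht
  set l2 := if st.2.1 + st.2.2 > st.1.length then st.1 ++ List.replicate (st.2.1 + st.2.2 - st.1.length) ""
            else st.1.take (st.2.1 + st.2.2) with hl2
  have hwle : st.2.1 ≤ s.length := by rw [hw, ht]; exact List.length_filter_le _ _
  have hl2tk : l2.take st.2.1 = t := by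
    rw [hl2]
    split_ifs with hgt
    · rw [List.take_append_of_le_length (by omega), htk]
    · rw [List.take_take, Nat.min_eq_left (by omega), htk]
  have hl2ln : l2.length = st.2.1 + st.2.2 := by
    rw [hl2]
    split_ifs with hgt
    · simp; omega
    · simp; omega
  have hsplit : l2 = t ++ l2.drop st.2.1 ++ [] := by
    rw [List.append_nil, ← hl2tk, List.take_append_drop]
  have hjlen : (l2.drop st.2.1).length = t.count "a" := by
    rw [List.length_drop, hl2ln]
    have hca : t.count "a" = s.count "a" := by
      rw [ht]; exact List.count_filter (by decide)
    omega
  have hwt : st.2.1 = t.length := hw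
  calc raPhase2 l2 ((st.2.1 : Int) - 1) (-1) st.2.1
      = raPhase2 (t ++ l2.drop st.2.1 ++ []) ((t.length : Int) - 1)
          (-((([] : List String)).length : Int) - 1) t.length := by
        rw [← hsplit, hwt]; norm_num
    _ = t.flatMap expandNB ++ [] := phase2_spec t (l2.drop st.2.1) [] hjlen
    _ = s.flatMap repB := by rw [List.append_nil, ht, flatMap_filter]
    _ = _ := (alt_eq_flatMap s []).symm
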